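-- pv_equiv track=rewrite | github.com/unsolomon/algorithm_study | 프로그래머스/0/181854. 배열의 길이에 따라 다른 연산하기/배열의 길이에 따라 다른 연산하기.py | solution
-- ===== SOURCE A (Python) =====
-- def solution(arr, n):
--     answer = []
--     length = len(arr)
--     for i in range(length):
--         # 홀수 길이: 짝수 인덱스에 n 더하기
--         if length % 2 == 1 and i % 2 == 0:
--             answer.append(arr[i] + n)
--         # 짝수 길이: 홀수 인덱스에 n 더하기
--         elif length % 2 == 0 and i % 2 == 1:
--             answer.append(arr[i] + n)
--         else:
--             answer.append(arr[i])
--     return answer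
-- ===== SOURCE B (Python) =====
-- def solution(arr, n):
--     # parity prefix + pairwise zip of strided slices (no per-index branching)
--     if len(arr) % 2:
--         out = [arr[0] + n]
--         rest = arr[1:]
--     else:
--         out = []
--         rest = arr
--     for x, y in zip(rest[::2], rest[1::2]):
--         out.append(x)
--         out.append(y + n)
--     return out
-- ===== Notes on version B (the rewrite author's own statement) =====
-- stated objective: alternative
-- what changed: Replaces A's per-index loop with two parity branches by a parity-determined one-element prefix followed by a single pass over zipped stride-2 slices, adding n to the second element of each pair.
import Mathlib
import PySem

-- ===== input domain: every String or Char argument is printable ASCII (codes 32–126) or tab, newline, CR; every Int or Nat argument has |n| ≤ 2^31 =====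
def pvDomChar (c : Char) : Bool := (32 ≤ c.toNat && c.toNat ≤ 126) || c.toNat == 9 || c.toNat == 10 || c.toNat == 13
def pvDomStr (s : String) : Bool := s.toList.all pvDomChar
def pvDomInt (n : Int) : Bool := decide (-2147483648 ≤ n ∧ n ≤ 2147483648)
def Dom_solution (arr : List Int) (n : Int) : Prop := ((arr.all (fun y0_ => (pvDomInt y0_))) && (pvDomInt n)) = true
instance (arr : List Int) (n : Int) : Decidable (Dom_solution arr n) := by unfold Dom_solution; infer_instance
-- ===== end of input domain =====

-- B replaces A's per-index loop with a parity branch at every index by a parity-determined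
-- one-element prefix plus a single pass over zipped stride-2 slices (alternative decomposition, same cost).

-- ===== PORT A =====
-- A: build answer over range(len(arr)), branching on length/index parity at every index.
-- arr[i] is ported as pyGetD arr i 0; every index the range yields is in range, so this is exact.
def solution (arr : List Int) (n : Int) : List Int :=
  let length : Int := PySem.List.len arr
  (PySem.List.pyRange 0 length 1).foldl (fun answer i =>
    if length % 2 == 1 && i % 2 == 0 then answer ++ [PySem.List.pyGetD arr i 0 + n]
    else if length % 2 == 0 && i % 2 == 1 then answer ++ [PySem.List.pyGetD arr i 0 + n]
    else answer ++ [PySem.List.pyGetD arr i 0]) []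

-- ===== PORT B =====
-- hand port of the stride-2 slice xs[::2] (every second element starting at index 0); exact on lists
def pvEvens : List Int → List Int
  | [] => []
  | [x] => [x]
  | x :: _ :: r => x :: pvEvens r

-- hand port of the stride-2 slice xs[1::2] (every second element starting at index 1); exact on lists
def pvOdds : List Int → List Int
  | [] => []
  | [_] => []
  | _ :: y :: r => y :: pvOdds r

def solution_alt (arr : List Int) (n : Int) : List Int :=
  let p :=
    if (PySem.List.len arr) % 2 == 1 then
      ([PySem.List.pyGetD arr 0 0 + n], PySem.List.slice arr (some 1) none)
    else ([], arr)
  ((pvEvens p.2).zip (pvOdds p.2)).foldl (fun out xy => (out ++ [xy.1]) ++ [xy.2 + n]) p.1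

-- ===== PRECONDITION & SPEC =====
def Spec_solution (arr : List Int) (n : Int) (out : List Int) : Prop := out = solution_alt arr n
instance (arr : List Int) (n : Int) (out : List Int) : Decidable (Spec_solution arr n out) := by unfold Spec_solution; infer_instance

-- ===== CLAIM (what is proved, stated in full; the proofs are below) =====
def Claim_equal_solution : Prop := ∀ (arr : List Int) (n : Int), Dom_solution arr n → Spec_solution arr n (solution arr n)

-- ===== LEMMAS AND PROOFS =====

-- the common elementwise description of both programs: element k gets +n iff length + k is odd
def pvSpec (arr : List Int) (n : Int) : List Int :=
  (List.range arr.length).map (fun k => if (arr.length + k) % 2 = 1 then arr.getD k 0 + n else arr.getD k 0)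

-- B's appending loop body is an extend by [x, y+n]
theorem foldl_step (n : Int) (l : List (Int × Int)) (acc : List Int) :
    l.foldl (fun out xy => (out ++ [xy.1]) ++ [xy.2 + n]) acc = acc ++ l.flatMap (fun xy => [xy.1, xy.2 + n]) := by
  have h : (fun (out : List Int) (xy : Int × Int) => (out ++ [xy.1]) ++ [xy.2 + n])
      = fun out xy => out ++ [xy.1, xy.2 + n] := by
    funext out xy; simp
  rw [h, PySem.List.foldl_append_eq_flatMap]

-- on an even-length list, the zipped stride-2 pass produces the elementwise description with "+n at odd k"
theorem zipflat (n : Int) : ∀ (l : List Int), l.length % 2 = 0 →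
    ((pvEvens l).zip (pvOdds l)).flatMap (fun xy => [xy.1, xy.2 + n]) =
      (List.range l.length).map (fun k => if k % 2 = 1 then l.getD k 0 + n else l.getD k 0)
  | [], _ => by simp [pvEvens, pvOdds]
  | [x], h => by simp at h
  | x :: y :: r, h => by
    have hr : r.length % 2 = 0 := by simp at h; omega
    have ih := zipflat n r hr
    show ([x, y + n] ++ ((pvEvens r).zip (pvOdds r)).flatMap (fun xy => [xy.1, xy.2 + n])) = _
    rw [ih]
    have hlen : (x :: y :: r).length = r.length + 1 + 1 := by simp
    rw [hlen, List.range_succ_eq_map, List.range_succ_eq_map]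
    simp only [List.map_cons, List.map_map]
    have hF : ((fun k => if k % 2 = 1 then (x :: y :: r).getD k 0 + n else (x :: y :: r).getD k 0) ∘ Nat.succ ∘ Nat.succ)
        = fun k => if k % 2 = 1 then r.getD k 0 + n else r.getD k 0 := by
      funext k
      simp [Function.comp, Nat.succ_eq_add_one]
      omega
    rw [hF]
    simp

theorem solution_eq_spec (arr : List Int) (n : Int) : solution arr n = pvSpec arr n := by
  unfold solution
  simp only [PySem.List.len_eq, PySem.List.pyRange_zero_nat, List.foldl_map, PySem.List.pyGetD_natCast]
  have hbody : (fun (answer : List Int) (k : Nat) =>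
      if ((arr.length : Int) % 2 == 1 && (k : Int) % 2 == 0) then answer ++ [arr.getD k 0 + n]
      else if ((arr.length : Int) % 2 == 0 && (k : Int) % 2 == 1) then answer ++ [arr.getD k 0 + n]
      else answer ++ [arr.getD k 0])
      = fun answer k => answer ++ [if (arr.length + k) % 2 = 1 then arr.getD k 0 + n else arr.getD k 0] := by
    funext answer k
    simp only [Bool.and_eq_true, beq_iff_eq]
    split_ifs <;> first | rfl | omega
  rw [hbody, PySem.List.foldl_append_singleton_eq_map, List.nil_append, pvSpec]

theorem alt_eq_spec (arr : List Int) (n : Int) : solution_alt arr n = pvSpec arr n := by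
  unfold solution_alt
  simp only [PySem.List.len_eq]
  by_cases hodd : arr.length % 2 = 1
  · -- odd length: arr is nonempty
    cases arr with
    | nil => simp at hodd
    | cons x t =>
      have ht : t.length % 2 = 0 := by simp at hodd ⊢; omega
      have hcond : (((x :: t).length : Int) % 2 == 1) = true := by
        simp; omega
      simp only [hcond, if_true, PySem.List.pyGetD_zero_cons, PySem.List.slice_from_one, List.tail_cons]
      rw [foldl_step, zipflat n t ht, pvSpec]
      have hlen : (x :: t).length = t.length + 1 := by simp
      rw [hlen, List.range_succ_eq_map]
      simp only [List.map_cons, List.map_map, List.getD_cons_zero]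
      have h0 : (if (t.length + 1 + 0) % 2 = 1 then x + n else x) = x + n := by
        rw [if_pos (by omega)]
      rw [h0]
      simp only [List.singleton_append]
      symm
      apply congrArg (List.cons (x + n))
      apply List.map_congr_left
      intro k hk
      simp only [Function.comp, Nat.succ_eq_add_one, List.getD_cons_succ]
      have hmod : (t.length + 1 + (k + 1)) % 2 = k % 2 := by omega
      rw [hmod]
  · -- even length
    have hcond : (((arr).length : Int) % 2 == 1) = false := by
      simp; omega
    simp only [hcond, Bool.false_eq_true, if_false]
    rw [foldl_step, zipflat n arr (by omega), List.nil_append, pvSpec]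
    apply List.map_congr_left
    intro k hk
    have : (arr.length + k) % 2 = k % 2 := by omega
    rw [this]

-- ===== VERDICT (by name: the statement is the Claim_ definition above) =====
theorem solution_spec : Claim_equal_solution := by
  intro arr n _
  unfold Spec_solution
  rw [solution_eq_spec, alt_eq_spec]
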